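-- pv_equiv track=rewrite | github.com/duynguyenfpt/CPLEX | TeamSelection/CPLEX.py | compute_ObjectiveMDSB
-- ===== SOURCE A (Python) =====
-- def compute_ObjectiveMDSB(X,numberSkill,E,R):
--     sum = 0
--     for index in range(numberSkill):
--         tmp = 0
--         for j in X:
--             tmp+= R[j][index]
--         sum += (E[index]-tmp) **2
--     return sum
-- ===== SOURCE B (Python) =====
-- def compute_ObjectiveMDSB(X, numberSkill, E, R):
--     # Multiplicity index: collapse X into a counting dict once; each skill's
--     # deficit is then a weighted sum over the DISTINCT selected members.
--     counts = {}
--     for j in X: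
--         counts[j] = counts.get(j, 0) + 1
--     return sum(
--         (E[i] - sum(c * R[j][i] for j, c in counts.items())) ** 2
--         for i in range(numberSkill)
--     )
-- ===== Notes on version B (the rewrite author's own statement) =====
-- stated objective: alternative
-- what changed: B first builds a multiplicity dictionary over X (a counter), so each skill's deficit becomes a weighted sum over the distinct selected members instead of A's rescan of the whole duplicate-carrying X per skill; exact because the values are integers.
import Mathlib
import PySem

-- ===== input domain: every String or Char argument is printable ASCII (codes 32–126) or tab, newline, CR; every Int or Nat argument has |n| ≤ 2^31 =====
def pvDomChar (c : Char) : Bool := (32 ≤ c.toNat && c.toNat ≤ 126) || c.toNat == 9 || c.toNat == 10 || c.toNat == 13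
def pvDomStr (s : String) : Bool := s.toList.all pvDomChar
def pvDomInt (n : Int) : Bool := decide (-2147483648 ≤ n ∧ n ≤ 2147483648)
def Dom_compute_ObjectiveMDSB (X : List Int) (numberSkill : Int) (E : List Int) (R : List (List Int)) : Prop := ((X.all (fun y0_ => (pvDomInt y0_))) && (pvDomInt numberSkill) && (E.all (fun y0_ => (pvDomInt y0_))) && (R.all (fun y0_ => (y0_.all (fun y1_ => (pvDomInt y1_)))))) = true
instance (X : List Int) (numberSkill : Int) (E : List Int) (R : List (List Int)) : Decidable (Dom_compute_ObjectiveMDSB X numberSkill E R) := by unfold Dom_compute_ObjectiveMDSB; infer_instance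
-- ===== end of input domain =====

-- B builds a multiplicity dictionary (counter) over X once, then computes each
-- skill's deficit as a weighted sum over the distinct selected members
-- (alternative algorithm; exact because all values are integers).

-- ===== PORT A =====
def compute_ObjectiveMDSB (X : List Int) (numberSkill : Int) (E : List Int) (R : List (List Int)) : Int :=
  (PySem.List.pyRange 0 numberSkill 1).foldl (fun sum index =>
    let tmp := X.foldl (fun tmp j =>
      tmp + PySem.List.pyGetD (PySem.List.pyGetD R j []) index 0) 0
    sum + (PySem.List.pyGetD E index 0 - tmp) ^ 2) 0

-- ===== PORT B =====
def compute_ObjectiveMDSB_alt (X : List Int) (numberSkill : Int) (E : List Int) (R : List (List Int)) : Int :=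
  let counts : PySem.Dict Int Int :=
    X.foldl (fun d j => d.insert j (d.getD j 0 + 1)) PySem.Dict.empty
  ((PySem.List.pyRange 0 numberSkill 1).map (fun i =>
    (PySem.List.pyGetD E i 0 -
      (counts.items.map (fun p =>
        p.2 * PySem.List.pyGetD (PySem.List.pyGetD R p.1 []) i 0)).sum) ^ 2)).sum

-- ===== PRECONDITION & SPEC =====
-- Pre_ excludes exactly the inputs where Python A raises IndexError: when the
-- skill loop runs, every accessed index must be in range of E and of each R[j].
def Pre_compute_ObjectiveMDSB (X : List Int) (numberSkill : Int) (E : List Int) (R : List (List Int)) : Prop :=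
  0 < numberSkill →
    (numberSkill ≤ (E.length : Int) ∧
     ∀ j ∈ X, PySem.Raise.InRange R.length j ∧
              numberSkill ≤ ((PySem.List.pyGetD R j []).length : Int))
instance (X : List Int) (numberSkill : Int) (E : List Int) (R : List (List Int)) : Decidable (Pre_compute_ObjectiveMDSB X numberSkill E R) := by unfold Pre_compute_ObjectiveMDSB; infer_instance

def pvWitness_compute_ObjectiveMDSB : List Int × Int × List Int × List (List Int) :=
  ([0, 1, 0], 2, [3, 4], [[1, 2], [0, 1]])

def Spec_compute_ObjectiveMDSB (X : List Int) (numberSkill : Int) (E : List Int) (R : List (List Int)) (out : Int) : Prop := out = compute_ObjectiveMDSB_alt X numberSkill E R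
instance (X : List Int) (numberSkill : Int) (E : List Int) (R : List (List Int)) (out : Int) : Decidable (Spec_compute_ObjectiveMDSB X numberSkill E R out) := by unfold Spec_compute_ObjectiveMDSB; infer_instance

-- ===== CLAIM (what is proved, stated in full; the proofs are below) =====
def Claim_equal_compute_ObjectiveMDSB : Prop := ∀ (X : List Int) (numberSkill : Int) (E : List Int) (R : List (List Int)), Dom_compute_ObjectiveMDSB X numberSkill E R → Pre_compute_ObjectiveMDSB X numberSkill E R → Spec_compute_ObjectiveMDSB X numberSkill E R (compute_ObjectiveMDSB X numberSkill E R)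

-- ===== LEMMAS AND PROOFS =====

-- On a duplicate-free list containing j, the sum that picks f at j and 0 elsewhere is f j.
theorem pvSumIte (s : List Int) (j : Int) (f : Int → Int) (hnd : s.Nodup) (hj : j ∈ s) :
    (s.map (fun k => if k = j then f k else 0)).sum = f j := by
  induction s with
  | nil => cases hj
  | cons a t ih =>
    rcases List.nodup_cons.1 hnd with ⟨ha, hndt⟩
    by_cases haj : a = j
    · subst haj
      have hz : (t.map (fun k => if k = a then f k else 0)).sum = 0 := by
        apply List.sum_eq_zero
        intro x hx
        rcases List.mem_map.1 hx with ⟨k, hk, rfl⟩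
        have hka : ¬ k = a := by rintro rfl; exact ha hk
        simp [hka]
      simp [hz]
    · have hjt : j ∈ t := by cases hj with | head => exact absurd rfl haj | tail _ h => exact h
      simp [haj, ih hndt hjt]

-- The weighted sum over distinct elements (with multiplicities) equals the plain sum over X.
theorem pvWeightedSum (X : List Int) (f : Int → Int) :
    ((PySem.Set.ofList X).map (fun k => (X.count k : Int) * f k)).sum = (X.map f).sum := by
  induction X using List.reverseRecOn with
  | nil => rfl
  | append_singleton X j ih =>
    have hset : PySem.Set.ofList (X ++ [j]) = PySem.Set.add (PySem.Set.ofList X) j := by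
      simp [PySem.Set.ofList_eq_foldl, List.foldl_append]
    have hcount : ∀ k : Int, ((X ++ [j]).count k : Int) = (X.count k : Int) + (if k = j then 1 else 0) := by
      intro k
      rw [List.count_append]
      push_cast
      congr 1
      by_cases h : k = j
      · simp [h]
      · simp [h, Ne.symm h]
    by_cases hmem : PySem.Set.contains (PySem.Set.ofList X) j = true
    · have hjX : j ∈ PySem.Set.ofList X := by
        simpa [PySem.Set.contains] using hmem
      rw [hset, PySem.Set.add, if_pos hmem]
      calc ((PySem.Set.ofList X).map (fun k => ((X ++ [j]).count k : Int) * f k)).sum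
          = ((PySem.Set.ofList X).map (fun k => (X.count k : Int) * f k + (if k = j then f k else 0))).sum := by
            apply congrArg
            apply List.map_congr_left
            intro k _
            rw [hcount k]
            by_cases h : k = j
            · simp [h]; ring
            · simp [h]
        _ = ((PySem.Set.ofList X).map (fun k => (X.count k : Int) * f k)).sum
              + ((PySem.Set.ofList X).map (fun k => if k = j then f k else 0)).sum := by
            rw [← List.sum_map_add]
        _ = (X.map f).sum + f j := by
            rw [ih, pvSumIte _ j f (PySem.Set.nodup_ofList X) hjX]
      simp [List.map_append]
    · have hjX : j ∉ PySem.Set.ofList X := by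
        simpa [PySem.Set.contains] using hmem
      have hjX' : j ∉ X := fun h => hjX ((PySem.Set.mem_ofList X j).mpr h)
      rw [hset, PySem.Set.add, if_neg hmem]
      rw [List.map_append, List.sum_append]
      have h1 : ((PySem.Set.ofList X).map (fun k => ((X ++ [j]).count k : Int) * f k)).sum
          = (X.map f).sum := by
        rw [← ih]
        apply congrArg
        apply List.map_congr_left
        intro k hk
        have hkj : ¬ k = j := by rintro rfl; exact hjX hk
        rw [hcount k]; simp [hkj]
      have h2 : (([j].map (fun k => ((X ++ [j]).count k : Int) * f k))).sum = f j := by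
        have hc0 : (X.count j : Int) = 0 := by
          simp [List.count_eq_zero_of_not_mem hjX']
        simp [hc0]
      rw [h1, h2]
      simp [List.map_append]

-- ===== VERDICT (by name: the statement is the Claim_ definition above) =====
theorem compute_ObjectiveMDSB_spec : Claim_equal_compute_ObjectiveMDSB := by
  intro X n E R _ _
  simp only [Spec_compute_ObjectiveMDSB, compute_ObjectiveMDSB, compute_ObjectiveMDSB_alt]
  rw [PySem.Dict.foldl_insert_getD_add_one_eq_counter, PySem.List.foldl_add, zero_add]
  apply congrArg
  apply List.map_congr_left
  intro index _
  rw [PySem.List.foldl_add, zero_add, PySem.Dict.items_counter, List.map_map]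
  simp only [Function.comp_def]
  rw [pvWeightedSum X (fun k => PySem.List.pyGetD (PySem.List.pyGetD R k []) index 0)]
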